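-- pv_equiv track=rewrite | github.com/Nickstech707/Code-Wars-Tests | Task7.py | solution
-- ===== SOURCE A (Python) =====
-- def solution(S):
--     """
--     Finds a pair of strings in the given array S that have the same letter at the same position.
--
--     Args:
--         S (List[str]): Array of strings.
--
--     Returns:
--         List[int]: Array containing three integers representing the indexes in S of the strings belonging to the pair,
--                    and the position of the common letter. If no common letter is found, returns an empty array.
--     """
--     N = len(S)  # Number of strings in S
--     M = len(S[0])  # Length of each string in S
--     common_letters = []  # List to store the pairs of strings with common letters
--
--     for i in range(N):
--         for j in range(i + 1, N):
--             for k in range(M):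
--                 if S[i][k] == S[j][k]:
--                     common_letters.append([i, j, k])  # Append the pair of strings and the common letter position
--                     break
--
--     return common_letters[0] if common_letters else []  # Return the first pair of common letters found, or an empty array
-- ===== SOURCE B (Python) =====
-- def solution(S):
--     """Linear-time re-implementation: one backward pass records, per (position, letter),
--     the nearest later string index; a forward pass picks the first string with a partner."""
--     M = len(S[0])
--     nxt = {}                     # (k, c) -> smallest index > current i whose char at k is c
--     next_match = [None] * len(S)
--     for i in range(len(S) - 1, -1, -1):
--         best = None
--         for k in range(M):
--             j = nxt.get((k, S[i][k]))
--             if j is not None and (best is None or j < best):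
--                 best = j
--         next_match[i] = best
--         for k in range(M):
--             nxt[(k, S[i][k])] = i
--     for i, j in enumerate(next_match):
--         if j is not None:
--             for k in range(M):
--                 if S[i][k] == S[j][k]:
--                     return [i, j, k]
--     return []
-- ===== Notes on version B (the rewrite author's own statement) =====
-- stated objective: faster
-- what changed: Replaces the all-pairs triple loop with a single backward pass that records, per (position,letter), the nearest later string index, so each string's closest partner is found in O(1) lookups; a forward pass then returns the first string with a partner.
-- outside the precondition, e.g. on solution(['ab', 'a']): A returns [0, 1, 0], B raises IndexError
import Mathlib
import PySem

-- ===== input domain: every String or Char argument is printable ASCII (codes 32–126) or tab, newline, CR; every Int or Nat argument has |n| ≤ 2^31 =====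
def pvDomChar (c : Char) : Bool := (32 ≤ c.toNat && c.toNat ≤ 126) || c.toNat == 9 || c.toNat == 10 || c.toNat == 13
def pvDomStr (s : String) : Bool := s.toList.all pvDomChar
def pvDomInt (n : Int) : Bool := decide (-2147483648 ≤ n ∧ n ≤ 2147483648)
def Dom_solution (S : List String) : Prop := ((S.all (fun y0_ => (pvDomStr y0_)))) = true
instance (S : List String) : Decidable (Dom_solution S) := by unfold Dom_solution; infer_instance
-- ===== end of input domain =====

-- B replaces A's all-pairs O(N^2*M) scan by one backward pass indexing, per (position, letter),
-- the nearest later string index, then a forward pass — O(N*M); proved to return A's exact value on Pre_.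

-- ===== PORT A =====
-- S[i][k] (total helper; under Pre_ every access it is used for is in range)
def chAt (S : List String) (i k : Int) : Char :=
  match PySem.List.pyGet? S i with
  | some s => (PySem.Str.pyGet? s k).getD (Char.ofNat 0)
  | none => Char.ofNat 0

-- A's inner k-loop with break: first k in range(M) with S[i][k] == S[j][k]
def firstK (S : List String) (i j M : Int) : Option Int :=
  (PySem.List.pyRange 0 M 1).find? (fun k => chAt S i k == chAt S j k)

def solution (S : List String) : List Int :=
  match S with
  | [] => []  -- Python raises IndexError on S[0] here (excluded by Pre_)
  | s0 :: _ =>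
    let N : Int := (S.length : Int)
    let M : Int := PySem.Str.len s0
    let common : List (List Int) :=
      (PySem.List.pyRange 0 N 1).foldl (fun acc i =>
        (PySem.List.pyRange (i + 1) N 1).foldl (fun acc2 j =>
          match firstK S i j M with
          | some k => acc2 ++ [[i, j, k]]
          | none => acc2) acc) []
    common.headD []

-- ===== PORT B =====
-- best = min over k of nxt.get((k, S[i][k]))
def bestOf (S : List String) (nxt : PySem.Dict (Int × Char) Int) (i M : Int) : Option Int :=
  (PySem.List.pyRange 0 M 1).foldl (fun best k =>
    match nxt.get? (k, chAt S i k), best with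
    | some j, some b => if j < b then some j else some b
    | some j, none => some j
    | none, _ => best) none

-- for k in range(M): nxt[(k, S[i][k])] = i
def updNxt (S : List String) (nxt : PySem.Dict (Int × Char) Int) (i M : Int) :
    PySem.Dict (Int × Char) Int :=
  (PySem.List.pyRange 0 M 1).foldl (fun d k => d.insert (k, chAt S i k) i) nxt

-- one iteration of the backward loop (next_match filled back-to-front = cons)
def stepBD (S : List String) (M : Int)
    (st : List (Option Int) × PySem.Dict (Int × Char) Int) (i : Int) :
    List (Option Int) × PySem.Dict (Int × Char) Int :=
  (bestOf S st.2 i M :: st.1, updNxt S st.2 i M)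

-- next_match, built by the backward for-loop over range(N-1, -1, -1)
def buildNM (S : List String) (N M : Int) : List (Option Int) :=
  ((PySem.List.pyRange (N - 1) (-1) (-1)).foldl (stepBD S M) ([], PySem.Dict.empty)).1

-- the forward enumerate loop: first i with a partner, then the first matching k
def firstHit (S : List String) (nm : List (Option Int)) (i M : Int) : List Int :=
  match nm with
  | [] => []
  | none :: rest => firstHit S rest (i + 1) M
  | some j :: rest =>
    match firstK S i j M with
    | some k => [i, j, k]
    | none => firstHit S rest (i + 1) M

def solution_alt (S : List String) : List Int :=
  match S with
  | [] => []  -- Python raises IndexError on S[0] here (excluded by Pre_)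
  | s0 :: _ =>
    let N : Int := (S.length : Int)
    let M : Int := PySem.Str.len s0
    firstHit S (buildNM S N M) 0 M

-- ===== PRECONDITION & SPEC =====
-- Pre_ excludes the empty list (A raises IndexError on S[0]) and lists containing a string
-- shorter than S[0], where A's access S[i][k], k < len(S[0]), raises IndexError except when an
-- accidental earlier match breaks out of the k-loop first (see the cited example).
def Pre_solution (S : List String) : Prop :=
  S ≠ [] ∧ ∀ s ∈ S, PySem.Str.len (S.headD "") ≤ PySem.Str.len s

instance (S : List String) : Decidable (Pre_solution S) := by
  unfold Pre_solution; infer_instance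

def pvWitness_solution : List String := ["ab", "cb"]

def Spec_solution (S : List String) (out : List Int) : Prop := out = solution_alt S
instance (S : List String) (out : List Int) : Decidable (Spec_solution S out) := by
  unfold Spec_solution; infer_instance

-- ===== CLAIM (what is proved, stated in full; the proofs are below) =====
def Claim_equal_solution : Prop :=
  ∀ (S : List String), Dom_solution S → Pre_solution S → Spec_solution S (solution S)

-- ===== LEMMAS AND PROOFS =====

-- abbreviations used only by the proofs
def ominI (best o : Option Int) : Option Int :=
  match o, best with
  | some j, some b => if j < b then some j else some b
  | some j, none => some j
  | none, _ => best

def anyM (S : List String) (M i j : Int) : Bool :=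
  (PySem.List.pyRange 0 M 1).any (fun k => chAt S i k == chAt S j k)

def minJ (S : List String) (N M i : Int) : Option Int :=
  (PySem.List.pyRange (i + 1) N 1).find? (fun j => anyM S M i j)

-- general Option/List facts used below
theorem findSome?_eq_find?_bind {α β : Type} (l : List α) (f : α → Option β) :
    l.findSome? f = (l.find? (fun x => (f x).isSome)).bind f := by
  induction l with
  | nil => rfl
  | cons x xs ih => cases h : f x <;> simp [h, ih]

theorem find?_isSome_eq_any {α : Type} (l : List α) (p : α → Bool) :
    (l.find? p).isSome = l.any p := by
  rw [Bool.eq_iff_iff]; simp [List.find?_isSome, List.any_eq_true]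

theorem ominI_none (b : Option Int) : ominI b none = b := rfl

theorem omin_fold_hit (x : Int) (f : Int → Option Int) :
    ∀ (ks : List Int) (b0 : Option Int),
      (∀ v, b0 = some v → x ≤ v) → (∀ k ∈ ks, ∀ v, f k = some v → x ≤ v) →
      (b0 = some x ∨ ∃ k ∈ ks, f k = some x) →
      ks.foldl (fun b k => ominI b (f k)) b0 = some x := by
  intro ks
  induction ks with
  | nil =>
    intro b0 hb0 _ hhit
    rcases hhit with h | ⟨k, hk, _⟩
    · simpa using h
    · simp at hk
  | cons a ks ih =>
    intro b0 hb0 hf hhit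
    simp only [List.foldl_cons]
    have hb1 : ∀ v, ominI b0 (f a) = some v → x ≤ v := by
      intro v hv
      cases hfa : f a with
      | none => exact hb0 v (by rw [hfa] at hv; exact hv)
      | some j =>
        have hxj : x ≤ j := hf a (by simp) j hfa
        cases hb : b0 with
        | none => rw [hfa, hb] at hv; simp [ominI] at hv; omega
        | some b =>
          have hxb : x ≤ b := hb0 b hb
          rw [hfa, hb] at hv; simp [ominI] at hv
          split at hv <;> simp at hv <;> omega
    apply ih _ hb1 (fun k hk => hf k (by simp [hk]))
    rcases hhit with h | ⟨k, hk, hkx⟩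
    · left
      cases hfa : f a with
      | none => rw [h]; rfl
      | some j =>
        have hxj : x ≤ j := hf a (by simp) j hfa
        rw [h]; simp [ominI]; omega
    · rcases List.mem_cons.mp hk with rfl | hk'
      · left
        cases hb : b0 with
        | none => rw [hkx]; rfl
        | some b =>
          have hxb : x ≤ b := hb0 b hb
          rw [hkx]; simp [ominI]
          omega
      · right; exact ⟨k, hk', hkx⟩

theorem omin_fold_find (p : Int → Int → Bool) :
    ∀ (r : List Int), r.Pairwise (· < ·) → ∀ (ks : List Int),
      ks.foldl (fun b k => ominI b (r.find? (p k))) none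
        = r.find? (fun j => ks.any (fun k => p k j)) := by
  intro r
  induction r with
  | nil =>
    intro _ ks
    simp only [List.find?_nil, ominI_none]
    exact PySem.List.foldl_ignore ks none
  | cons x r ih =>
    intro hp ks
    have hx : ∀ y ∈ r, x < y := (List.pairwise_cons.mp hp).1
    have hr : r.Pairwise (· < ·) := (List.pairwise_cons.mp hp).2
    by_cases hx0 : ks.any (fun k => p k x) = true
    · rw [List.find?_cons_of_pos (p := fun j => ks.any (fun k => p k j)) (by simpa using hx0)]
      apply omin_fold_hit x _ ks none (by simp)
      · intro k _ v hv
        rcases hpk : p k x with _ | _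
        · rw [List.find?_cons_of_neg (by simp [hpk])] at hv
          have := hx v (List.mem_of_find?_eq_some hv); omega
        · rw [List.find?_cons_of_pos hpk] at hv
          simp at hv; omega
      · right
        obtain ⟨k, hk, hpk⟩ := List.any_eq_true.mp hx0
        exact ⟨k, hk, List.find?_cons_of_pos hpk⟩
    · have hx0' : ∀ k ∈ ks, p k x = false := by
        intro k hk
        have := List.any_eq_false.mp (Bool.eq_false_iff.mpr hx0) k hk
        simpa using this
      rw [List.find?_cons_of_neg (p := fun j => ks.any (fun k => p k j)) (by simpa using hx0)]
      rw [← ih hr ks]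
      apply PySem.List.foldl_congr_mem
      intro b k hk
      rw [List.find?_cons_of_neg (by simp [hx0' k hk])]

-- ===== A-side normal form =====
theorem foldA_inner (S : List String) (M i : Int) (r : List Int) (acc : List (List Int)) :
    r.foldl (fun acc2 j => match firstK S i j M with
      | some k => acc2 ++ [[i, j, k]]
      | none => acc2) acc
    = acc ++ r.filterMap (fun j => (firstK S i j M).map (fun k => [i, j, k])) := by
  induction r generalizing acc with
  | nil => simp
  | cons x xs ih => cases h : firstK S i x M <;> simp [h, ih]

theorem solution_eq_canon (s0 : String) (rest : List String) :
    solution (s0 :: rest)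
      = ((PySem.List.pyRange 0 ((s0 :: rest).length : Int) 1).findSome? (fun i =>
          (PySem.List.pyRange (i + 1) ((s0 :: rest).length : Int) 1).findSome? (fun j =>
            (firstK (s0 :: rest) i j (PySem.Str.len s0)).map (fun k => [i, j, k])))).getD [] := by
  have hcong := PySem.List.foldl_congr_mem
      (PySem.List.pyRange 0 ((s0 :: rest).length : Int) 1)
      (fun acc i => (PySem.List.pyRange (i + 1) ((s0 :: rest).length : Int) 1).foldl (fun acc2 j =>
          match firstK (s0 :: rest) i j (PySem.Str.len s0) with
          | some k => acc2 ++ [[i, j, k]]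
          | none => acc2) acc)
      (fun acc i => acc ++ (PySem.List.pyRange (i + 1) ((s0 :: rest).length : Int) 1).filterMap (fun j =>
          (firstK (s0 :: rest) i j (PySem.Str.len s0)).map (fun k => [i, j, k])))
      [] (fun acc i _ => foldA_inner ..)
  show (((PySem.List.pyRange 0 ((s0 :: rest).length : Int) 1).foldl (fun acc i =>
        (PySem.List.pyRange (i + 1) ((s0 :: rest).length : Int) 1).foldl (fun acc2 j =>
          match firstK (s0 :: rest) i j (PySem.Str.len s0) with
          | some k => acc2 ++ [[i, j, k]]
          | none => acc2) acc) []).headD []) = _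
  rw [hcong, PySem.List.foldl_append_eq_flatMap]
  simp only [List.nil_append, List.headD_eq_head?_getD, List.head?_flatMap, List.head?_filterMap]

theorem firstK_isSome (S : List String) (M i j : Int) :
    (firstK S i j M).isSome = anyM S M i j := by
  rw [firstK, anyM, find?_isSome_eq_any]

theorem inner_eq_minJ (S : List String) (N M i : Int) :
    (PySem.List.pyRange (i + 1) N 1).findSome? (fun j =>
        (firstK S i j M).map (fun k => [i, j, k]))
      = (minJ S N M i).bind (fun j => (firstK S i j M).map (fun k => [i, j, k])) := by
  rw [findSome?_eq_find?_bind, minJ]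
  congr 1
  congr 1
  funext j
  rw [Option.isSome_map, firstK_isSome]

-- ===== B-side: the dictionary invariant =====
theorem get?_insertFold (g : Int → Char) (v : Int) :
    ∀ (ks : List Int) (d : PySem.Dict (Int × Char) Int) (k : Int) (c : Char),
      (ks.foldl (fun d k' => d.insert (k', g k') v) d).get? (k, c)
        = if k ∈ ks ∧ c = g k then some v else d.get? (k, c) := by
  intro ks
  induction ks with
  | nil => simp
  | cons a ks ih =>
    intro d k c
    simp only [List.foldl_cons]
    rw [ih, PySem.Dict.get?_insert]
    simp only [List.mem_cons, Prod.ext_iff]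
    split_ifs <;> simp_all

theorem any_beq_comm (ks : List Int) (f g : Int → Char) :
    ks.any (fun k => f k == g k) = ks.any (fun k => g k == f k) := by
  rw [Bool.eq_iff_iff]
  simp only [List.any_eq_true, beq_iff_eq]
  constructor <;> rintro ⟨k, hk, h⟩ <;> exact ⟨k, hk, h.symm⟩

theorem bestOf_eq (S : List String) (N M lo : Int) (d : PySem.Dict (Int × Char) Int)
    (hd : ∀ k ∈ PySem.List.pyRange 0 M 1, ∀ c,
      d.get? (k, c) = (PySem.List.pyRange (lo + 1) N 1).find? (fun j => chAt S j k == c)) :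
    bestOf S d lo M = minJ S N M lo := by
  show (PySem.List.pyRange 0 M 1).foldl
      (fun best k => ominI best (d.get? (k, chAt S lo k))) none = _
  rw [PySem.List.foldl_congr_mem _ _
      (fun best k => ominI best ((PySem.List.pyRange (lo + 1) N 1).find?
        (fun j => chAt S j k == chAt S lo k))) none
      (fun best k hk => by rw [hd k hk])]
  rw [omin_fold_find _ _ (PySem.List.pairwise_lt_pyRange_one ..)]
  rw [minJ]
  congr 1
  funext j
  rw [anyM]
  exact any_beq_comm ..

theorem st_step (S : List String) (N M lo : Int) (h : lo < N) :
    (PySem.List.pyRange (N - 1) (lo - 1) (-1)).foldl (stepBD S M) ([], PySem.Dict.empty)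
      = stepBD S M
          ((PySem.List.pyRange (N - 1) lo (-1)).foldl (stepBD S M) ([], PySem.Dict.empty)) lo := by
  rw [PySem.List.pyRange_neg_one_eq_reverse, PySem.List.pyRange_neg_one_eq_reverse]
  rw [show lo - 1 + 1 = lo from by ring, show N - 1 + 1 = N from by ring]
  rw [PySem.List.pyRange_one_cons h, List.reverse_cons, List.foldl_append]
  rfl

theorem build_inv (S : List String) (N M : Int) :
    ∀ (n : Nat) (lo : Int), lo + n = N →
      (∀ k ∈ PySem.List.pyRange 0 M 1, ∀ c,
        (((PySem.List.pyRange (N - 1) (lo - 1) (-1)).foldl (stepBD S M)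
            ([], PySem.Dict.empty)).2).get? (k, c)
          = (PySem.List.pyRange lo N 1).find? (fun j => chAt S j k == c)) ∧
      ((PySem.List.pyRange (N - 1) (lo - 1) (-1)).foldl (stepBD S M)
          ([], PySem.Dict.empty)).1
        = (PySem.List.pyRange lo N 1).map (fun i => minJ S N M i) := by
  intro n
  induction n with
  | zero =>
    intro lo h
    rw [PySem.List.pyRange_neg_one_eq_nil (a := N - 1) (b := lo - 1) (by omega),
        PySem.List.pyRange_one_eq_nil (a := lo) (b := N) (by omega)]
    simp [PySem.Dict.get?_empty]
  | succ n ih =>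
    intro lo h
    have hlo : lo < N := by omega
    have hprev := ih (lo + 1) (by omega)
    rw [show lo + 1 - 1 = lo from by ring] at hprev
    obtain ⟨hd, hl⟩ := hprev
    rw [st_step S N M lo hlo]
    constructor
    · intro k hk c
      show ((PySem.List.pyRange 0 M 1).foldl
        (fun d k' => d.insert (k', chAt S lo k') lo)
        ((PySem.List.pyRange (N - 1) lo (-1)).foldl (stepBD S M) ([], PySem.Dict.empty)).2).get? (k, c) = _
      rw [get?_insertFold (fun k' => chAt S lo k') lo]
      rw [PySem.List.pyRange_one_cons hlo]
      by_cases hc : c = chAt S lo k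
      · rw [if_pos ⟨hk, hc⟩, List.find?_cons_of_pos (by simp [hc])]
      · rw [if_neg (by tauto), List.find?_cons_of_neg (by simpa using fun h => hc h.symm)]
        exact hd k hk c
    · show bestOf S ((PySem.List.pyRange (N - 1) lo (-1)).foldl (stepBD S M) ([], PySem.Dict.empty)).2 lo M
          :: ((PySem.List.pyRange (N - 1) lo (-1)).foldl (stepBD S M) ([], PySem.Dict.empty)).1 = _
      rw [PySem.List.pyRange_one_cons hlo, List.map_cons, hl, bestOf_eq S N M lo _ hd]

theorem buildNM_eq (S : List String) (M : Int) :
    buildNM S (S.length : Int) M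
      = (PySem.List.pyRange 0 (S.length : Int) 1).map (fun i => minJ S (S.length : Int) M i) := by
  have h := (build_inv S (S.length : Int) M S.length 0 (by omega)).2
  rw [show ((0 : Int) - 1) = (-1 : Int) from by ring] at h
  exact h

theorem firstHit_eq (S : List String) (N M : Int) :
    ∀ (n : Nat) (a : Int), a + n = N →
      firstHit S ((PySem.List.pyRange a N 1).map (fun i => minJ S N M i)) a M
        = ((PySem.List.pyRange a N 1).findSome? (fun i =>
            (minJ S N M i).bind (fun j => (firstK S i j M).map (fun k => [i, j, k])))).getD [] := by
  intro n
  induction n with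
  | zero =>
    intro a h
    rw [PySem.List.pyRange_one_eq_nil (a := a) (b := N) (by omega)]
    rfl
  | succ n ih =>
    intro a h
    have ha : a < N := by omega
    rw [PySem.List.pyRange_one_cons ha, List.map_cons, List.findSome?_cons]
    cases hm : minJ S N M a with
    | none =>
      exact ih (a + 1) (by omega)
    | some j =>
      have hany : anyM S M a j = true := List.find?_some hm
      have hsome : (firstK S a j M).isSome := by rw [firstK_isSome]; exact hany
      obtain ⟨k0, hk0⟩ := Option.isSome_iff_exists.mp hsome
      show firstHit S (some j :: _) a M = _
      simp [firstHit, hk0]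

-- ===== VERDICT (by name: the statement is the Claim_ definition above) =====
theorem solution_spec : Claim_equal_solution := by
  unfold Claim_equal_solution
  intro S _ hpre
  unfold Spec_solution
  obtain ⟨hne, -⟩ := hpre
  cases S with
  | nil => exact absurd rfl hne
  | cons s0 rest =>
    rw [solution_eq_canon]
    show _ = firstHit (s0 :: rest)
        (buildNM (s0 :: rest) (((s0 :: rest).length : Nat) : Int) (PySem.Str.len s0)) 0 (PySem.Str.len s0)
    rw [buildNM_eq,
        firstHit_eq (s0 :: rest) (((s0 :: rest).length : Nat) : Int) (PySem.Str.len s0)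
          (s0 :: rest).length 0 (by omega)]
    congr 1
    congr 1
    funext i
    exact inner_eq_minJ ..
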